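-- pv_equiv track=rewrite | github.com/alekshnl/QvfMetadataExtractor | scripts/extract_qvf.py | decode_indexed_values
-- ===== SOURCE A (Python) =====
-- from typing import Any
--
-- def decode_indexed_values(vector: dict[str, Any], dictionary_values: list[Any], scheme: str) -> list[Any]:
--     if scheme == "ranked_unique":
--         ordered_codes = sorted(set(vector["values"]))
--         mapping = {code: dictionary_values[index] for index, code in enumerate(ordered_codes[: len(dictionary_values)])}
--         return [mapping.get(value) for value in vector["values"]]
--     if scheme == "ranked_unique_null_zero":
--         ordered_codes = sorted(code for code in set(vector["values"]) if code != 0)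
--         mapping = {0: None}
--         mapping.update({code: dictionary_values[index] for index, code in enumerate(ordered_codes[: len(dictionary_values)])})
--         return [mapping.get(value) for value in vector["values"]]
--
--     decoded: list[Any] = []
--     for value in vector["values"]:
--         if scheme == "zero_based":
--             decoded.append(dictionary_values[value] if 0 <= value < len(dictionary_values) else None)
--         elif scheme == "one_based":
--             decoded.append(dictionary_values[value - 1] if 1 <= value <= len(dictionary_values) else None)
--         elif scheme == "zero_null_one_based":
--             decoded.append(None if value == 0 else dictionary_values[value - 1] if 1 <= value <= len(dictionary_values) else None)
--         elif scheme == "zero_null_one_based_fill_zero":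
--             decoded.append(dictionary_values[0] if value == 0 and dictionary_values else dictionary_values[value - 1] if 1 <= value <= len(dictionary_values) else None)
--         elif scheme == "zero_null_skip_one":
--             decoded.append(None if value in {0, 1} else dictionary_values[value - 2] if 2 <= value <= len(dictionary_values) + 1 else None)
--         else:
--             decoded.append(None)
--     return decoded
-- ===== SOURCE B (Python) =====
-- from typing import Any
--
-- _OFFSETS = {
--     "zero_based": 0,
--     "one_based": 1,
--     "zero_null_one_based": 1,
--     "zero_null_one_based_fill_zero": 1,
--     "zero_null_skip_one": 2,
-- }
--
-- def decode_indexed_values(vector: dict[str, Any], dictionary_values: list[Any], scheme: str) -> list[Any]: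
--     values = vector["values"]
--     n = len(dictionary_values)
--     mapping: dict[Any, Any] = {}
--     if scheme == "ranked_unique" or scheme == "ranked_unique_null_zero":
--         codes = sorted(set(values))
--         if scheme == "ranked_unique_null_zero":
--             codes = [code for code in codes if code != 0]
--         for index, code in enumerate(codes[:n]):
--             mapping[code] = dictionary_values[index]
--     elif scheme in _OFFSETS:
--         offset = _OFFSETS[scheme]
--         for value in set(values):
--             if offset <= value < offset + n:
--                 mapping[value] = dictionary_values[value - offset]
--         if scheme == "zero_null_one_based_fill_zero" and dictionary_values:
--             mapping[0] = dictionary_values[0]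
--     return [mapping.get(value) for value in values]
-- ===== Notes on version B (the rewrite author's own statement) =====
-- stated objective: alternative
-- what changed: Replaces the per-element if/elif scheme dispatch inside the output loop with a decode table: every scheme (via an offset table for the index-based ones) first builds one dict from each distinct value to its decoded result, and the output is a single uniform lookup pass.
import Mathlib
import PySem

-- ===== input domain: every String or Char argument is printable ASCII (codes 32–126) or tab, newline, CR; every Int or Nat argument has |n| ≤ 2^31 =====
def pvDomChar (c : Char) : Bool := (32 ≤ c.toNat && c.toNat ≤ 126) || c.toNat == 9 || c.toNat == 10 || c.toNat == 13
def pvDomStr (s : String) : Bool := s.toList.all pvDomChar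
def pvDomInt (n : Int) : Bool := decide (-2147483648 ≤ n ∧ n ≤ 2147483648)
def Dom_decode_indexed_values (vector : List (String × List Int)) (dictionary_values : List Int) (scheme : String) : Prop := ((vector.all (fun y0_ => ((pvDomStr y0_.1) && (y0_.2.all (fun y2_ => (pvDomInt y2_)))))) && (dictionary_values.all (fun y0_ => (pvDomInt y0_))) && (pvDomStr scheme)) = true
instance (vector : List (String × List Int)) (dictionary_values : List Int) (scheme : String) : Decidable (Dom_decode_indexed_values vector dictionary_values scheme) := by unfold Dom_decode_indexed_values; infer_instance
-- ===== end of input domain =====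

-- B replaces the per-element if/elif scheme dispatch inside the output loop by building, for every
-- scheme (offset-table-driven for the index-based ones), one dict from each distinct value to its
-- decoded result, followed by a single uniform lookup pass; objective: alternative (not claimed faster).

-- ===== PORT A =====
-- '.getD []' on the "values" lookup is only reached outside Pre_ (Python raises KeyError there);
-- '.getD 0' after pyGet? is only a type unwrap: the surrounding guard ensures the index is in range.
def decode_indexed_values (vector : List (String × List Int)) (dictionary_values : List Int) (scheme : String) : List (Option Int) :=
  let values := ((PySem.Dict.mk vector).get? "values").getD []
  let n : Int := (dictionary_values.length : Int)
  if scheme == "ranked_unique" then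
    let ordered_codes := PySem.List.sorted (PySem.Set.ofList values) (fun x => x)
    let mapping : PySem.Dict Int Int :=
      (PySem.List.enumerate (ordered_codes.take dictionary_values.length)).foldl
        (fun m ic => m.insert ic.2 ((PySem.List.pyGet? dictionary_values ic.1).getD 0)) PySem.Dict.empty
    values.map (fun v => mapping.get? v)
  else if scheme == "ranked_unique_null_zero" then
    let ordered_codes := PySem.List.sorted ((PySem.Set.ofList values).filter (fun c => !(c == 0))) (fun x => x)
    let mapping : PySem.Dict Int (Option Int) :=
      (PySem.List.enumerate (ordered_codes.take dictionary_values.length)).foldl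
        (fun m ic => m.insert ic.2 (some ((PySem.List.pyGet? dictionary_values ic.1).getD 0)))
        (PySem.Dict.empty.insert 0 none)
    values.map (fun v => (mapping.get? v).getD none)
  else
    values.foldl (fun decoded value =>
      if scheme == "zero_based" then
        decoded ++ [if 0 ≤ value ∧ value < n then PySem.List.pyGet? dictionary_values value else none]
      else if scheme == "one_based" then
        decoded ++ [if 1 ≤ value ∧ value ≤ n then PySem.List.pyGet? dictionary_values (value - 1) else none]
      else if scheme == "zero_null_one_based" then
        decoded ++ [if value = 0 then none
                    else if 1 ≤ value ∧ value ≤ n then PySem.List.pyGet? dictionary_values (value - 1) else none]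
      else if scheme == "zero_null_one_based_fill_zero" then
        decoded ++ [if value = 0 ∧ dictionary_values ≠ [] then PySem.List.pyGet? dictionary_values 0
                    else if 1 ≤ value ∧ value ≤ n then PySem.List.pyGet? dictionary_values (value - 1) else none]
      else if scheme == "zero_null_skip_one" then
        decoded ++ [if value = 0 ∨ value = 1 then none
                    else if 2 ≤ value ∧ value ≤ n + 1 then PySem.List.pyGet? dictionary_values (value - 2) else none]
      else
        decoded ++ [none]) []

-- ===== PORT B =====
def pvOffsets : PySem.Dict String Int :=
  PySem.Dict.ofList [("zero_based", 0), ("one_based", 1), ("zero_null_one_based", 1),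
                     ("zero_null_one_based_fill_zero", 1), ("zero_null_skip_one", 2)]

-- '.getD []' / '.getD 0' exactly as in port A (KeyError outside Pre_; guarded in-range index).
def decode_indexed_values_alt (vector : List (String × List Int)) (dictionary_values : List Int) (scheme : String) : List (Option Int) :=
  let values := ((PySem.Dict.mk vector).get? "values").getD []
  let n : Int := (dictionary_values.length : Int)
  let mapping : PySem.Dict Int Int :=
    if scheme == "ranked_unique" || scheme == "ranked_unique_null_zero" then
      let codes0 := PySem.List.sorted (PySem.Set.ofList values) (fun x => x)
      let codes := if scheme == "ranked_unique_null_zero" then codes0.filter (fun c => !(c == 0)) else codes0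
      (PySem.List.enumerate (codes.take dictionary_values.length)).foldl
        (fun m ic => m.insert ic.2 ((PySem.List.pyGet? dictionary_values ic.1).getD 0)) PySem.Dict.empty
    else
      match pvOffsets.get? scheme with
      | some offset =>
        let m := (PySem.Set.ofList values).foldl
          (fun m value =>
            if offset ≤ value ∧ value < offset + n then
              m.insert value ((PySem.List.pyGet? dictionary_values (value - offset)).getD 0)
            else m) PySem.Dict.empty
        if scheme == "zero_null_one_based_fill_zero" ∧ dictionary_values ≠ [] then
          m.insert 0 ((PySem.List.pyGet? dictionary_values 0).getD 0)
        else m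
      | none => PySem.Dict.empty
  values.map (fun v => mapping.get? v)

-- ===== PRECONDITION & SPEC =====
-- Pre_ excludes only the inputs where the Python A raises KeyError: no "values" key in vector.
def Pre_decode_indexed_values (vector : List (String × List Int)) (_dictionary_values : List Int) (_scheme : String) : Prop :=
  ((PySem.Dict.mk vector).get? "values").isSome = true
instance (vector : List (String × List Int)) (dictionary_values : List Int) (scheme : String) : Decidable (Pre_decode_indexed_values vector dictionary_values scheme) := by unfold Pre_decode_indexed_values; infer_instance

def pvWitness_decode_indexed_values : (List (String × List Int)) × List Int × String :=
  ([("values", [0, 1, 2, 5])], [10, 20], "one_based")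

def Spec_decode_indexed_values (vector : List (String × List Int)) (dictionary_values : List Int) (scheme : String) (out : List (Option Int)) : Prop := out = decode_indexed_values_alt vector dictionary_values scheme
instance (vector : List (String × List Int)) (dictionary_values : List Int) (scheme : String) (out : List (Option Int)) : Decidable (Spec_decode_indexed_values vector dictionary_values scheme out) := by unfold Spec_decode_indexed_values; infer_instance

-- ===== CLAIM (what is proved, stated in full; the proofs are below) =====
def Claim_equal_decode_indexed_values : Prop := ∀ (vector : List (String × List Int)) (dictionary_values : List Int) (scheme : String), Dom_decode_indexed_values vector dictionary_values scheme → Pre_decode_indexed_values vector dictionary_values scheme → Spec_decode_indexed_values vector dictionary_values scheme (decode_indexed_values vector dictionary_values scheme)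

-- ===== LEMMAS AND PROOFS =====

-- in-range pyGet? is some of its own default-unwrap
theorem pyGet?_eq_some_getD (l : List Int) (i : Int) (h0 : 0 ≤ i) (h1 : i < (l.length : Int)) :
    PySem.List.pyGet? l i = some ((PySem.List.pyGet? l i).getD 0) := by
  have hi : i = ((i.toNat : Nat) : Int) := by omega
  rw [hi, PySem.List.pyGet?_natCast]
  have h2 : i.toNat < l.length := by omega
  simp [h2]

-- lookup in a dict built by inserting (key = p.2, value from p.1) along a list with distinct keys
theorem get?_foldl_insert_enum {ν : Type} (L : List (Int × Int)) (f : Int → ν) (d0 : PySem.Dict Int ν) (k : Int)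
    (hnd : (L.map (·.2)).Nodup) :
    (L.foldl (fun m ic => m.insert ic.2 (f ic.1)) d0).get? k =
      (match L.find? (fun ic => ic.2 == k) with
       | some ic => some (f ic.1)
       | none => d0.get? k) := by
  induction L generalizing d0 with
  | nil => simp
  | cons p L ih =>
    simp only [List.map_cons, List.nodup_cons] at hnd
    simp only [List.foldl_cons]
    by_cases hk : p.2 = k
    · have hfind : L.find? (fun ic => ic.2 == k) = none := by
        apply List.find?_eq_none.mpr
        intro q hq
        simp only [beq_iff_eq]
        intro hq2
        have hm : q.2 ∈ L.map (·.2) := List.mem_map_of_mem hq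
        rw [hq2, ← hk] at hm
        exact hnd.1 hm
      have hfc : List.find? (fun ic => ic.2 == k) (p :: L) = some p := by
        simp [hk]
      rw [hfc, ih _ hnd.2, hfind]
      simp [hk, PySem.Dict.get?_insert_self]
    · have hfc : List.find? (fun ic => ic.2 == k) (p :: L) = List.find? (fun ic => ic.2 == k) L := by
        simp [hk]
      rw [hfc, ih _ hnd.2]
      cases hf : L.find? (fun ic => ic.2 == k) <;>
        simp [PySem.Dict.get?_insert, Ne.symm hk]

-- lookup in a dict built by a guarded insert loop (value a function of the key only)
theorem get?_foldl_guard_insert (S : List Int) (g : Int → Prop) [DecidablePred g] (f : Int → Int)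
    (d0 : PySem.Dict Int Int) (k : Int) :
    (S.foldl (fun m v => if g v then m.insert v (f v) else m) d0).get? k =
      if k ∈ S ∧ g k then some (f k) else d0.get? k := by
  induction S generalizing d0 with
  | nil => simp
  | cons v S ih =>
    simp only [List.foldl_cons]
    rw [ih]
    by_cases hgk : g k
    · by_cases hkS : k ∈ S
      · simp [hkS, hgk]
      · by_cases hkv : k = v
        · subst hkv
          simp [hkS, hgk, PySem.Dict.get?_insert_self]
        · have h1 : ¬(k ∈ S ∧ g k) := fun h => hkS h.1
          have h2 : ¬(k ∈ v :: S ∧ g k) := by simp [hkv, hkS]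
          rw [if_neg h1, if_neg h2]
          by_cases hgv : g v
          · simp [hgv, PySem.Dict.get?_insert, hkv]
          · simp [hgv]
    · have h1 : ¬(k ∈ S ∧ g k) := fun h => hgk h.2
      have h2 : ¬(k ∈ v :: S ∧ g k) := fun h => hgk h.2
      rw [if_neg h1, if_neg h2]
      by_cases hgv : g v
      · have hkv : k ≠ v := fun h => hgk (h ▸ hgv)
        simp [hgv, PySem.Dict.get?_insert, hkv]
      · simp [hgv]

-- sorting the 0-filtered distinct values = filtering the sorted distinct values
theorem sorted_filter_set (values : List Int) :
    PySem.List.sorted ((PySem.Set.ofList values).filter (fun c => !(c == 0))) (fun x => x) =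
      (PySem.List.sorted (PySem.Set.ofList values) (fun x => x)).filter (fun c => !(c == 0)) := by
  apply PySem.List.sorted_eq_of_perm_of_pairwise_lt
  · exact List.Perm.filter _ (PySem.List.sorted_perm _ _ _)
  · exact List.Pairwise.sublist List.filter_sublist (PySem.List.sorted_ofList_pairwise_lt values)

-- the mapping fold of the ranked schemes, looked up pointwise
theorem get?_ranked_fold {ν : Type} (codes : List Int) (hnd : codes.Nodup) (len : Nat) (f : Int → ν)
    (d0 : PySem.Dict Int ν) (k : Int) :
    ((PySem.List.enumerate (codes.take len)).foldl (fun m ic => m.insert ic.2 (f ic.1)) d0).get? k =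
      (match (PySem.List.enumerate (codes.take len)).find? (fun ic => ic.2 == k) with
       | some ic => some (f ic.1)
       | none => d0.get? k) := by
  apply get?_foldl_insert_enum
  rw [PySem.List.map_snd_enumerate]
  exact hnd.sublist (List.take_sublist _ _)

-- ===== VERDICT (by name: the statement is the Claim_ definition above) =====
theorem decode_indexed_values_spec : Claim_equal_decode_indexed_values := by
  intro vector dictionary_values scheme _ _
  unfold Spec_decode_indexed_values decode_indexed_values decode_indexed_values_alt
  set values := ((PySem.Dict.mk vector).get? "values").getD [] with hv
  set n : Int := (dictionary_values.length : Int) with hn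
  have hnodup : (PySem.List.sorted (PySem.Set.ofList values) (fun x => x)).Nodup :=
    ((PySem.List.sorted_perm _ _ _).nodup_iff).mpr (PySem.Set.nodup_ofList values)
  have hmem : ∀ v ∈ values, v ∈ PySem.Set.ofList values := fun v hv => (PySem.Set.mem_ofList values v).mpr hv
  by_cases h1 : scheme = "ranked_unique"
  · subst h1; simp
  by_cases h2 : scheme = "ranked_unique_null_zero"
  · -- A: dict of Option values starting from {0 ↦ none}; B: Int-valued dict, filter after sorting
    subst h2
    simp only [String.reduceBEq, Bool.or_true, if_true, if_false, Bool.false_eq_true]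
    rw [sorted_filter_set values]
    apply List.map_congr_left
    intro v _
    rw [get?_ranked_fold _ (hnodup.filter _) _ (fun i => some ((PySem.List.pyGet? dictionary_values i).getD 0)) _ v,
        get?_ranked_fold _ (hnodup.filter _) _ (fun i => (PySem.List.pyGet? dictionary_values i).getD 0) _ v]
    cases hf : (PySem.List.enumerate (((PySem.List.sorted (PySem.Set.ofList values) (fun x => x)).filter
        (fun c => !(c == 0))).take dictionary_values.length)).find? (fun ic => ic.2 == v) with
    | some ic => simp
    | none =>
      simp only []
      rw [PySem.Dict.get?_insert]
      by_cases hv0 : v = 0 <;> simp [hv0]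
  -- index-based schemes: A's per-element if/elif chain vs B's guarded-fold dict + lookup
  by_cases h3 : scheme = "zero_based"
  · subst h3
    simp only [String.reduceBEq, Bool.or_self, if_false, reduceIte, Bool.false_eq_true]
    rw [show pvOffsets.get? "zero_based" = some 0 from rfl]
    simp only [false_and, if_false]
    rw [PySem.List.foldl_append_singleton_eq_map
      (f := fun value => if 0 ≤ value ∧ value < n then PySem.List.pyGet? dictionary_values value else none)]
    simp only [List.nil_append]
    apply List.map_congr_left
    intro v hvv
    rw [get?_foldl_guard_insert]
    simp only [hmem v hvv, true_and, PySem.Dict.get?_empty, zero_add, sub_zero]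
    split_ifs with hr
    · exact pyGet?_eq_some_getD _ _ hr.1 hr.2
    · rfl
  by_cases h4 : scheme = "one_based"
  · subst h4
    simp only [String.reduceBEq, Bool.or_self, if_false, reduceIte, Bool.false_eq_true]
    rw [show pvOffsets.get? "one_based" = some 1 from rfl]
    simp only [false_and, if_false]
    rw [PySem.List.foldl_append_singleton_eq_map
      (f := fun value => if 1 ≤ value ∧ value ≤ n then PySem.List.pyGet? dictionary_values (value - 1) else none)]
    simp only [List.nil_append]
    apply List.map_congr_left
    intro v hvv
    rw [get?_foldl_guard_insert]
    simp only [hmem v hvv, true_and, PySem.Dict.get?_empty]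
    rw [if_congr (show (1 ≤ v ∧ v < 1 + n) ↔ (1 ≤ v ∧ v ≤ n) by omega) rfl rfl]
    split_ifs with hr
    · exact pyGet?_eq_some_getD _ _ (by omega) (by omega)
    · rfl
  by_cases h5 : scheme = "zero_null_one_based"
  · subst h5
    simp only [String.reduceBEq, Bool.or_self, if_false, reduceIte, Bool.false_eq_true]
    rw [show pvOffsets.get? "zero_null_one_based" = some 1 from rfl]
    simp only [false_and, if_false]
    rw [PySem.List.foldl_append_singleton_eq_map
      (f := fun value => if value = 0 then none
            else if 1 ≤ value ∧ value ≤ n then PySem.List.pyGet? dictionary_values (value - 1) else none)]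
    simp only [List.nil_append]
    apply List.map_congr_left
    intro v hvv
    rw [get?_foldl_guard_insert]
    simp only [hmem v hvv, true_and, PySem.Dict.get?_empty]
    rw [if_congr (show (1 ≤ v ∧ v < 1 + n) ↔ (1 ≤ v ∧ v ≤ n) by omega) rfl rfl]
    by_cases hv0 : v = 0
    · rw [if_pos hv0, if_neg (by omega)]
    · rw [if_neg hv0]
      split_ifs with hr
      · exact pyGet?_eq_some_getD _ _ (by omega) (by omega)
      · rfl
  by_cases h6 : scheme = "zero_null_one_based_fill_zero"
  · subst h6
    simp only [String.reduceBEq, Bool.or_self, if_false, reduceIte, Bool.false_eq_true]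
    rw [show pvOffsets.get? "zero_null_one_based_fill_zero" = some 1 from rfl]
    rw [PySem.List.foldl_append_singleton_eq_map
      (f := fun value => if value = 0 ∧ dictionary_values ≠ [] then PySem.List.pyGet? dictionary_values 0
            else if 1 ≤ value ∧ value ≤ n then PySem.List.pyGet? dictionary_values (value - 1) else none)]
    simp only [List.nil_append]
    apply List.map_congr_left
    intro v hvv
    by_cases hd : dictionary_values = []
    · simp only [hd, ne_eq, not_true_eq_false, and_false, if_false]
      rw [get?_foldl_guard_insert]
      simp only [hmem v hvv, true_and, PySem.Dict.get?_empty]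
      have hn0 : n = 0 := by simp [hn, hd]
      rw [if_neg (by omega), if_neg (by omega)]
    · simp only [hd, ne_eq, not_false_eq_true, and_true, reduceIte]
      rw [PySem.Dict.get?_insert, get?_foldl_guard_insert]
      simp only [hmem v hvv, true_and, PySem.Dict.get?_empty]
      by_cases hv0 : v = 0
      · have hlen : (0:Int) < n := by
          rw [hn]; exact_mod_cast List.length_pos_iff.mpr hd
        rw [if_pos hv0, if_pos hv0]
        exact pyGet?_eq_some_getD _ _ le_rfl hlen
      · rw [if_neg hv0, if_neg hv0,
            if_congr (show (1 ≤ v ∧ v < 1 + n) ↔ (1 ≤ v ∧ v ≤ n) by omega) rfl rfl]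
        split_ifs with hr
        · exact pyGet?_eq_some_getD _ _ (by omega) (by omega)
        · rfl
  by_cases h7 : scheme = "zero_null_skip_one"
  · subst h7
    simp only [String.reduceBEq, Bool.or_self, if_false, reduceIte, Bool.false_eq_true]
    rw [show pvOffsets.get? "zero_null_skip_one" = some 2 from rfl]
    simp only [false_and, if_false]
    rw [PySem.List.foldl_append_singleton_eq_map
      (f := fun value => if value = 0 ∨ value = 1 then none
            else if 2 ≤ value ∧ value ≤ n + 1 then PySem.List.pyGet? dictionary_values (value - 2) else none)]
    simp only [List.nil_append]
    apply List.map_congr_left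
    intro v hvv
    rw [get?_foldl_guard_insert]
    simp only [hmem v hvv, true_and, PySem.Dict.get?_empty]
    rw [if_congr (show (2 ≤ v ∧ v < 2 + n) ↔ (2 ≤ v ∧ v ≤ n + 1) by omega) rfl rfl]
    by_cases hv01 : v = 0 ∨ v = 1
    · rw [if_pos hv01, if_neg (by omega)]
    · rw [if_neg hv01]
      split_ifs with hr
      · exact pyGet?_eq_some_getD _ _ (by omega) (by omega)
      · rfl
  -- unknown scheme: A appends none for every value; B's mapping stays empty
  have hoff : pvOffsets.get? scheme = none := by
    rw [show pvOffsets = PySem.Dict.mk [("zero_based", 0), ("one_based", 1), ("zero_null_one_based", 1),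
          ("zero_null_one_based_fill_zero", 1), ("zero_null_skip_one", 2)] from rfl]
    simp only [PySem.Dict.get?_mk_cons, beq_iff_eq, Ne.symm h3, Ne.symm h4, Ne.symm h5, Ne.symm h6,
               Ne.symm h7, if_false]
    rfl
  have hb1 : (scheme == "ranked_unique" || scheme == "ranked_unique_null_zero") = false := by
    simp [h1, h2]
  simp only [beq_iff_eq, h1, h2, h3, h4, h5, h6, h7, if_false, hb1, Bool.false_eq_true, hoff]
  rw [PySem.List.foldl_append_singleton_eq_map (f := fun _ => (none : Option Int))]
  simp
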